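-- pv_equiv track=rewrite | github.com/Nickedude/advent_of_code_2022 | day_6.py | find_unique_characters
-- ===== SOURCE A (Python) =====
-- from typing import List
--
-- def _buffer_is_full(buffer: List, message_length: int) -> bool:
--     return len(buffer) == message_length
--
-- def _get_num_unique_chars(buffer: List) -> int:
--     return len(set(buffer))
--
-- def find_unique_characters(data: str, message_length: int) -> int:
--     buffer = []
--
--     for i, c in enumerate(data):
--         if _buffer_is_full(buffer, message_length):
--             buffer.pop(0)
--
--         buffer.append(c)
--         num_unique_chars = _get_num_unique_chars(buffer)
--
--         if _buffer_is_full(buffer, message_length) and num_unique_chars == message_length: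
--             return i + 1
-- ===== SOURCE B (Python) =====
-- def find_unique_characters(data: str, message_length: int) -> int:
--     # O(n) sliding window: per-char counts plus a running count of surplus
--     # duplicates in the current window; no window of non-positive length exists.
--     if message_length <= 0:
--         return None
--     counts = {}
--     duplicates = 0  # window size minus number of distinct chars in the window
--     for i, c in enumerate(data):
--         counts[c] = counts.get(c, 0) + 1
--         if counts[c] > 1:
--             duplicates += 1
--         if i >= message_length:
--             d = data[i - message_length]
--             counts[d] -= 1
--             if counts[d] > 0:
--                 duplicates -= 1
--         if duplicates == 0 and i + 1 >= message_length:
--             return i + 1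
--     return None
-- ===== Notes on version B (the rewrite author's own statement) =====
-- stated objective: faster
-- what changed: Replaced the rebuilt-buffer scan (which recomputes len(set(window)) for every position) by a single-pass sliding window that maintains a per-character count dict and a running surplus-duplicate counter, updated in O(1) per character.
import Mathlib
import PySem

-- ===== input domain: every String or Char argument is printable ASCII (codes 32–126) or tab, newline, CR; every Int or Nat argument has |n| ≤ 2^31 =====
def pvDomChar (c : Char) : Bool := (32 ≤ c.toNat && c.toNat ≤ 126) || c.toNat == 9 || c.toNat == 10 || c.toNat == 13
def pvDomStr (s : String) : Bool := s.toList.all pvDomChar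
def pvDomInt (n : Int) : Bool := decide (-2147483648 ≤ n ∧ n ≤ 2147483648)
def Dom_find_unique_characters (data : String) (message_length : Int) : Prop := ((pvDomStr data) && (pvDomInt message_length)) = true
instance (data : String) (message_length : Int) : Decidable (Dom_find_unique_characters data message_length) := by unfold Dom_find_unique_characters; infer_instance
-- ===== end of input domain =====

-- B replaces A's per-position len(set(window)) rescan by a one-pass sliding window with a
-- count dict and a surplus-duplicate counter (objective: faster).

-- ===== PORT A =====
def buffer_is_full (buffer : List Char) (message_length : Int) : Bool :=
  (buffer.length : Int) == message_length

def get_num_unique_chars (buffer : List Char) : Int :=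
  ((PySem.Set.ofList buffer).length : Int)

-- the 'for i, c in enumerate(data)' loop, carrying the buffer; 'none' at the pop of an
-- empty buffer is where Python raises IndexError (outside Pre_)
def fuc_loopA (message_length : Int) : List (Int × Char) → List Char → Option Int
  | [], _ => none
  | (i, c) :: rest, buffer₀ =>
    let popped : Option (List Char) :=
      if buffer_is_full buffer₀ message_length then (PySem.List.pop? buffer₀ 0).map (·.2)
      else some buffer₀
    match popped with
    | none => none
    | some buffer₁ =>
      let buffer := buffer₁ ++ [c]
      let num_unique_chars := get_num_unique_chars buffer
      if buffer_is_full buffer message_length && num_unique_chars == message_length then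
        some (i + 1)
      else fuc_loopA message_length rest buffer

def find_unique_characters (data : String) (message_length : Int) : Option Int :=
  fuc_loopA message_length (PySem.List.enumerate data.toList 0) []

-- ===== PORT B =====
-- Source B's loop: counts is the per-char count of the current window, duplicates its surplus;
-- the inner 'none' is data[i-m] out of range, unreachable from the initial state
def fuc_loopB (data : List Char) (message_length : Int) :
    List (Int × Char) → PySem.Dict Char Int → Int → Option Int
  | [], _, _ => none
  | (i, c) :: rest, counts₀, duplicates₀ =>
    let counts₁ := counts₀.insert c (counts₀.getD c 0 + 1)
    let duplicates₁ := if counts₁.getD c 0 > 1 then duplicates₀ + 1 else duplicates₀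
    if i ≥ message_length then
      match PySem.List.pyGet? data (i - message_length) with
      | none => none
      | some d =>
        let counts₂ := counts₁.insert d (counts₁.getD d 0 - 1)
        let duplicates₂ := if counts₂.getD d 0 > 0 then duplicates₁ - 1 else duplicates₁
        if duplicates₂ == 0 && i + 1 ≥ message_length then some (i + 1)
        else fuc_loopB data message_length rest counts₂ duplicates₂
    else
      if duplicates₁ == 0 && i + 1 ≥ message_length then some (i + 1)
      else fuc_loopB data message_length rest counts₁ duplicates₁

def find_unique_characters_alt (data : String) (message_length : Int) : Option Int :=
  if message_length ≤ 0 then none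
  else fuc_loopB data.toList message_length (PySem.List.enumerate data.toList 0) PySem.Dict.empty 0

-- ===== PRECONDITION & SPEC =====
-- Pre_ excludes only message_length = 0 with non-empty data, where A raises IndexError
-- (pop from an empty buffer); A returns on everything else.
def Pre_find_unique_characters (data : String) (message_length : Int) : Prop :=
  message_length ≠ 0 ∨ data = ""
instance (data : String) (message_length : Int) : Decidable (Pre_find_unique_characters data message_length) := by unfold Pre_find_unique_characters; infer_instance

def pvWitness_find_unique_characters : String × Int := ("mjqjpqmgbljsphdztnvjfqwrcgsmlb", 4)

def Spec_find_unique_characters (data : String) (message_length : Int) (out : Option Int) : Prop := out = find_unique_characters_alt data message_length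
instance (data : String) (message_length : Int) (out : Option Int) : Decidable (Spec_find_unique_characters data message_length out) := by unfold Spec_find_unique_characters; infer_instance

-- ===== CLAIM (what is proved, stated in full; the proofs are below) =====
def Claim_equal_find_unique_characters : Prop := ∀ (data : String) (message_length : Int), Dom_find_unique_characters data message_length → Pre_find_unique_characters data message_length → Spec_find_unique_characters data message_length (find_unique_characters data message_length)

-- ===== LEMMAS AND PROOFS =====

def dupN (l : List Char) : Int := (l.length : Int) - (l.toFinset.card : Int)

theorem length_ofList_eq_card (l : List Char) :
    (PySem.Set.ofList l).length = l.toFinset.card := by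
  have nd := PySem.Set.nodup_ofList (α := Char) l
  have h : (PySem.Set.ofList l).toFinset = l.toFinset := by
    ext x; simp [PySem.Set.mem_ofList]
  rw [← List.toFinset_card_of_nodup nd, h]

theorem dupN_append (l : List Char) (c : Char) :
    dupN (l ++ [c]) = dupN l + (if c ∈ l then 1 else 0) := by
  unfold dupN
  rw [List.toFinset_append]
  simp only [List.toFinset_cons, List.toFinset_nil, insert_empty_eq, Finset.union_singleton]
  by_cases h : c ∈ l
  · rw [Finset.card_insert_of_mem (by simpa using h)]
    simp [h]; ring
  · rw [Finset.card_insert_of_notMem (by simpa using h)]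
    simp only [h, if_false, List.length_append, List.length_cons, List.length_nil]
    push_cast
    ring

theorem dupN_cons (d : Char) (u : List Char) :
    dupN (d :: u) = dupN u + (if d ∈ u then 1 else 0) := by
  unfold dupN
  rw [List.toFinset_cons]
  by_cases h : d ∈ u
  · rw [Finset.card_insert_of_mem (by simpa using h)]
    simp [h]; ring
  · rw [Finset.card_insert_of_notMem (by simpa using h)]
    simp only [h, if_false, List.length_cons]
    push_cast
    ring

theorem loopA_neg (m : Int) (hm : m < 0) :
    ∀ (rest : List Char) (i : Int) (buf : List Char),
      fuc_loopA m (PySem.List.enumerate rest i) buf = none := by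
  intro rest
  induction rest with
  | nil => intro i buf; simp [PySem.List.enumerate_nil, fuc_loopA]
  | cons c rest ih =>
    intro i buf
    rw [PySem.List.enumerate_cons]
    have h1 : buffer_is_full buf m = false := by
      simp [buffer_is_full]; omega
    have h2 : buffer_is_full (buf ++ [c]) m = false := by
      simp [buffer_is_full]; omega
    simp only [fuc_loopA, h1, h2, Bool.false_eq_true, if_false, Bool.false_and]
    exact ih (i + 1) (buf ++ [c])
theorem counts_insert_inc (counts : PySem.Dict Char Int) (buf : List Char) (c : Char)
    (h : ∀ ch, counts.getD ch 0 = (buf.count ch : Int)) :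
    ∀ ch, (counts.insert c (counts.getD c 0 + 1)).getD ch 0 = ((buf ++ [c]).count ch : Int) := by
  intro ch
  rw [PySem.Dict.getD_insert]
  by_cases hch : ch = c
  · subst hch; rw [if_pos rfl, h]; simp [List.count_append]
  · rw [if_neg hch, h]
    simp only [List.count_append, List.count_singleton]
    have : (c == ch) = false := by simp; exact fun h' => hch h'.symm
    simp [this]

theorem counts_insert_dec (counts : PySem.Dict Char Int) (d : Char) (u : List Char)
    (h : ∀ ch, counts.getD ch 0 = ((d :: u).count ch : Int)) :
    ∀ ch, (counts.insert d (counts.getD d 0 - 1)).getD ch 0 = (u.count ch : Int) := by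
  intro ch
  rw [PySem.Dict.getD_insert]
  by_cases hch : ch = d
  · subst hch; rw [if_pos rfl, h]; simp [List.count_cons_self]
  · rw [if_neg hch, h]
    simp only [List.count_cons]
    have : (d == ch) = false := by simp; exact fun h' => hch h'.symm
    simp [this]

theorem num_unique_eq (u : List Char) : get_num_unique_chars u = (u.toFinset.card : Int) := by
  simp [get_num_unique_chars, length_ofList_eq_card]

theorem loop_eq (m : Int) (hm : 1 ≤ m) (data : List Char) :
    ∀ (rest pre buf : List Char) (counts : PySem.Dict Char Int) (dups : Int),
      data = pre ++ buf ++ rest →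
      (buf.length : Int) ≤ m →
      ((buf.length : Int) < m → pre = []) →
      (∀ ch, counts.getD ch 0 = (buf.count ch : Int)) →
      dups = dupN buf →
      fuc_loopA m (PySem.List.enumerate rest ((pre.length : Int) + (buf.length : Int))) buf
        = fuc_loopB data m (PySem.List.enumerate rest ((pre.length : Int) + (buf.length : Int))) counts dups := by
  intro rest
  induction rest with
  | nil =>
    intro pre buf counts dups _ _ _ _ _
    simp [PySem.List.enumerate_nil, fuc_loopA, fuc_loopB]
  | cons c rest ih =>
    intro pre buf counts dups hdata hle hlt hcounts hdups
    rw [PySem.List.enumerate_cons]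
    rcases lt_or_eq_of_le hle with hltm | heqm
    · -- buffer not yet full: A does not pop, B does not evict
      have hpre : pre = [] := hlt hltm
      subst hpre
      have hfull0 : buffer_is_full buf m = false := by
        simp [buffer_is_full]; omega
      have hnotge : ¬ (((List.nil (α := Char)).length : Int) + (buf.length : Int) ≥ m) := by
        simp; omega
      have hd1 : (if (counts.insert c (counts.getD c 0 + 1)).getD c 0 > 1 then dups + 1 else dups)
          = dupN (buf ++ [c]) := by
        rw [counts_insert_inc counts buf c hcounts c, dupN_append, hdups]
        have hcnt : List.count c (buf ++ [c]) = List.count c buf + 1 := by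
          simp [List.count_append]
        by_cases hc : c ∈ buf
        · have h1 := (List.count_pos_iff).2 hc
          have hyes : ((List.count c (buf ++ [c]) : Nat) : Int) > 1 := by
            rw [hcnt]; push_cast; omega
          rw [if_pos hyes, if_pos hc]
        · have h1 := List.count_eq_zero_of_not_mem hc
          have hno : ¬ ((List.count c (buf ++ [c]) : Nat) : Int) > 1 := by
            rw [hcnt, h1]; norm_num
          rw [if_neg hno, if_neg hc]
          ring
      have hcard := (buf ++ [c]).toFinset_card_le
      have hcond : (buffer_is_full (buf ++ [c]) m && get_num_unique_chars (buf ++ [c]) == m)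
          = (dupN (buf ++ [c]) == 0 && ((List.nil (α := Char)).length : Int) + (buf.length : Int) + 1 ≥ m) := by
        rw [Bool.eq_iff_iff]
        simp only [Bool.and_eq_true, beq_iff_eq, buffer_is_full, num_unique_eq, dupN,
          decide_eq_true_eq, ge_iff_le, List.length_append, List.length_cons, List.length_nil]
        simp only [List.length_append, List.length_cons, List.length_nil] at hcard
        push_cast
        omega
      simp only [fuc_loopA, fuc_loopB, hfull0, Bool.false_eq_true, if_false, if_neg hnotge, hd1, hcond]
      split_ifs with h
      · rfl
      · have hidx : ((List.nil (α := Char)).length : Int) + (buf.length : Int) + 1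
            = ((List.nil (α := Char)).length : Int) + ((buf ++ [c]).length : Int) := by
          simp
        rw [hidx]
        exact ih [] (buf ++ [c]) _ _
          (by simpa using hdata)
          (by simp; omega)
          (fun _ => rfl)
          (counts_insert_inc counts buf c hcounts)
          rfl
    · -- buffer full: A pops the head, B evicts data[i - m]
      match buf, heqm with
      | [], heqm => exact absurd heqm (by simp; omega)
      | d :: t, heqm =>
      have hfull0 : buffer_is_full (d :: t) m = true := by
        simp only [buffer_is_full, beq_iff_eq]; exact heqm
      have hge : ((pre.length : Int) + ((d :: t).length : Int) ≥ m) := by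
        simp only [List.length_cons] at heqm ⊢; push_cast at heqm ⊢; omega
      have hget : PySem.List.pyGet? data ((pre.length : Int) + ((d :: t).length : Int) - m)
          = some d := by
        have : (pre.length : Int) + ((d :: t).length : Int) - m = ((pre.length : Nat) : Int) := by
          omega
        rw [this, PySem.List.pyGet?_natCast, hdata]
        rw [List.append_assoc, List.getElem?_append_right (le_refl _)]
        simp
      have hc1 : ∀ ch, ((counts.insert c (counts.getD c 0 + 1)).getD ch 0)
          = ((d :: (t ++ [c])).count ch : Int) := by
        intro ch
        have := counts_insert_inc counts (d :: t) c hcounts ch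
        simpa using this
      have hc2 := counts_insert_dec (counts.insert c (counts.getD c 0 + 1)) d (t ++ [c]) hc1
      have hd1 : (if (counts.insert c (counts.getD c 0 + 1)).getD c 0 > 1 then dups + 1 else dups)
          = dupN ((d :: t) ++ [c]) := by
        rw [counts_insert_inc counts (d :: t) c hcounts c, dupN_append, hdups]
        have hcnt : List.count c ((d :: t) ++ [c]) = List.count c (d :: t) + 1 := by
          simp [List.count_cons, List.count_append]
          ring
        by_cases hc : c ∈ d :: t
        · have h1 := (List.count_pos_iff).2 hc
          have hyes : ((List.count c ((d :: t) ++ [c]) : Nat) : Int) > 1 := by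
            rw [hcnt]; push_cast; omega
          rw [if_pos hyes, if_pos hc]
        · have h1 := List.count_eq_zero_of_not_mem hc
          have hno : ¬ ((List.count c ((d :: t) ++ [c]) : Nat) : Int) > 1 := by
            rw [hcnt, h1]; norm_num
          rw [if_neg hno, if_neg hc]
          ring
      have hd2 : (if ((counts.insert c (counts.getD c 0 + 1)).insert d
              ((counts.insert c (counts.getD c 0 + 1)).getD d 0 - 1)).getD d 0 > 0
            then dupN ((d :: t) ++ [c]) - 1 else dupN ((d :: t) ++ [c]))
          = dupN (t ++ [c]) := by
        rw [hc2 d]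
        have hsplit : dupN ((d :: t) ++ [c]) = dupN (t ++ [c]) + (if d ∈ t ++ [c] then 1 else 0) := by
          simpa using dupN_cons d (t ++ [c])
        by_cases hd : d ∈ t ++ [c]
        · have h1 := (List.count_pos_iff).2 hd
          have hyes : ((List.count d (t ++ [c]) : Nat) : Int) > 0 := by push_cast; omega
          rw [if_pos hyes, hsplit, if_pos hd]; ring
        · have h1 := List.count_eq_zero_of_not_mem hd
          have hno : ¬ ((List.count d (t ++ [c]) : Nat) : Int) > 0 := by rw [h1]; norm_num
          rw [if_neg hno, hsplit, if_neg hd]; ring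
      have hcard := (t ++ [c]).toFinset_card_le
      have hcond : (buffer_is_full (t ++ [c]) m && get_num_unique_chars (t ++ [c]) == m)
          = (dupN (t ++ [c]) == 0 && (pre.length : Int) + ((d :: t).length : Int) + 1 ≥ m) := by
        rw [Bool.eq_iff_iff]
        simp only [Bool.and_eq_true, beq_iff_eq, buffer_is_full, num_unique_eq, dupN,
          decide_eq_true_eq, ge_iff_le, List.length_append, List.length_cons, List.length_nil]
        simp only [List.length_append, List.length_cons, List.length_nil] at hcard ⊢
        simp only [List.length_cons] at heqm
        push_cast at heqm hcard ⊢
        omega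
      simp only [fuc_loopA, fuc_loopB, hfull0, if_true, PySem.List.pop?_zero_cons,
        Option.map_some, if_pos hge, hget, hd1, hd2, hcond]
      split_ifs with h
      · rfl
      · have hidx : (pre.length : Int) + ((d :: t).length : Int) + 1
            = (((pre ++ [d]).length : Nat) : Int) + (((t ++ [c]).length : Nat) : Int) := by
          simp only [List.length_append, List.length_cons, List.length_nil]
          push_cast; ring
        rw [hidx]
        exact ih (pre ++ [d]) (t ++ [c]) _ _
          (by rw [hdata]; simp)
          (by simp only [List.length_cons] at heqm
              simp only [List.length_append, List.length_cons, List.length_nil]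
              push_cast at heqm ⊢; omega)
          (by intro hlt'; exfalso
              simp only [List.length_cons] at heqm
              simp only [List.length_append, List.length_cons, List.length_nil] at hlt'
              push_cast at heqm hlt'; omega)
          hc2
          rfl

theorem find_unique_characters_spec : Claim_equal_find_unique_characters := by
  intro data m _ hpre
  unfold Spec_find_unique_characters find_unique_characters find_unique_characters_alt
  by_cases h0 : m ≤ 0
  · rw [if_pos h0]
    rcases hpre with hne | hempty
    · exact loopA_neg m (lt_of_le_of_ne h0 hne) data.toList 0 []
    · subst hempty
      have he : ("" : String).toList = [] := rfl
      rw [he, PySem.List.enumerate_nil]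
      rfl
  · rw [if_neg h0]
    have h := loop_eq m (by omega) data.toList data.toList [] [] PySem.Dict.empty 0
      (by simp) (by simp; omega) (fun _ => rfl)
      (fun ch => by simp [PySem.Dict.getD_empty])
      (by simp [dupN])
    simpa using h
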